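-- pv_equiv track=rewrite | github.com/annabel-stocksnatalias/DAHRS | fcfa_framework.py | get_src_tgt_candidates
-- ===== SOURCE A (Python) =====
-- from typing import Dict, List, Tuple, Any, Optional
--
-- def get_src_tgt_candidates(alignments: List[Tuple[int, int]]) -> Dict[int, List[int]]:
--     """
--     Create source-to-target candidate mapping.
--
--     Args:
--         alignments: List of (src, tgt) alignment pairs
--
--     Returns:
--         Dictionary mapping source indices to list of target indices
--     """
--     src_tgt_candi = {}
--     for src, tgt in alignments:
--         if src not in src_tgt_candi:
--             src_tgt_candi[src] = [tgt]
--         else: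
--             src_tgt_candi[src].append(tgt)
--     return src_tgt_candi
-- ===== SOURCE B (Python) =====
-- def get_src_tgt_candidates(alignments):
--     """Two-pass grouping: ordered distinct sources, then one scan per source."""
--     srcs = dict.fromkeys(src for src, _ in alignments)
--     return {src: [tgt for s, tgt in alignments if s == src] for src in srcs}
-- ===== Notes on version B (the rewrite author's own statement) =====
-- stated objective: alternative
-- what changed: Replaces A's single hash-mutation pass (dict of growing lists, membership-tested insert/append) with a two-pass strategy: first collect the distinct sources in first-occurrence order via dict.fromkeys, then build each source's target list by one filtering scan of the alignments.
import Mathlib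
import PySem

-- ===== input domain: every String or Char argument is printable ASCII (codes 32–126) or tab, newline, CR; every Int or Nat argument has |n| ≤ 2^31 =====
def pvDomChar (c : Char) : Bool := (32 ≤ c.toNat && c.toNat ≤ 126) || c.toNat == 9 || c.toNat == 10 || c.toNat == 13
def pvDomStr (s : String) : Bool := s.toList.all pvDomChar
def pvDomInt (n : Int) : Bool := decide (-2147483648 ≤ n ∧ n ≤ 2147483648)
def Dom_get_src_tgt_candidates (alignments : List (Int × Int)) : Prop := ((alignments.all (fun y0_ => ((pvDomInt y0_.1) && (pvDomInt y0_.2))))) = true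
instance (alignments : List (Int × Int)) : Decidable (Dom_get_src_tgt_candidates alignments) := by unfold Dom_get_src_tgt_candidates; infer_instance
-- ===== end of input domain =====

-- B groups by source in two passes (ordered distinct sources, then one filtering scan per source)
-- instead of A's single pass mutating a dict of growing lists; same return value, no speed claim.

-- ===== PORT A =====
-- one loop iteration: if src not in d: d[src] = [tgt] else: d[src].append(tgt)
def pvStepA (d : PySem.Dict Int (List Int)) (p : Int × Int) : PySem.Dict Int (List Int) :=
  if d.contains p.1 = false then d.insert p.1 [p.2] else d.modify p.1 [] (fun x => x ++ [p.2])

def get_src_tgt_candidates (alignments : List (Int × Int)) : List (Int × List Int) :=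
  (alignments.foldl pvStepA PySem.Dict.empty).items

-- ===== PORT B =====
-- srcs = dict.fromkeys(...)  →  PySem.List.dedup; then one filter per source
def get_src_tgt_candidates_alt (alignments : List (Int × Int)) : List (Int × List Int) :=
  (PySem.List.dedup (alignments.map Prod.fst)).map
    (fun src => (src, (alignments.filter (fun p => p.1 == src)).map (fun x => x.2)))

-- ===== PRECONDITION & SPEC =====
def Spec_get_src_tgt_candidates (alignments : List (Int × Int)) (out : List (Int × List Int)) : Prop := out = get_src_tgt_candidates_alt alignments
instance (alignments : List (Int × Int)) (out : List (Int × List Int)) : Decidable (Spec_get_src_tgt_candidates alignments out) := by unfold Spec_get_src_tgt_candidates; infer_instance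

-- ===== CLAIM (what is proved, stated in full; the proofs are below) =====
def Claim_equal_get_src_tgt_candidates : Prop := ∀ (alignments : List (Int × Int)), Dom_get_src_tgt_candidates alignments → Spec_get_src_tgt_candidates alignments (get_src_tgt_candidates alignments)

-- ===== LEMMAS AND PROOFS =====

-- A's branch is exactly Python's d[src] = f(d.get(src, [])), i.e. Dict.modify
theorem pvStepA_eq_modify (d : PySem.Dict Int (List Int)) (p : Int × Int) :
    pvStepA d p = d.modify p.1 [] (fun x => x ++ [p.2]) := by
  unfold pvStepA
  split_ifs with h
  · simp only [PySem.Dict.contains_eq_isSome_get?] at h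
    cases hg : d.get? p.1 with
    | none =>
        have h0 : d.getD p.1 [] = ([] : List Int) := PySem.Dict.getD_of_get?_eq_none d [] hg
        simp [PySem.Dict.insert, PySem.Dict.modify, PySem.Dict.contains_eq_isSome_get?, hg, h0]
    | some v => simp [hg] at h
  · rfl

-- ===== VERDICT (by name: the statement is the Claim_ definition above) =====
theorem get_src_tgt_candidates_spec : Claim_equal_get_src_tgt_candidates := by
  intro alignments _
  unfold Spec_get_src_tgt_candidates get_src_tgt_candidates get_src_tgt_candidates_alt
  have hfun : pvStepA = (fun (d : PySem.Dict Int (List Int)) (p : Int × Int) => d.modify p.1 [] (fun x => x ++ [p.2])) :=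
    funext fun d => funext fun p => pvStepA_eq_modify d p
  rw [hfun]
  have hnd := PySem.Dict.nodup_keys_foldl_modify_key alignments Prod.fst []
      (fun _ p => (fun x => x ++ [p.2])) PySem.Dict.empty PySem.Dict.nodup_keys_empty
  have hkeys := PySem.Dict.keys_foldl_modify_key alignments Prod.fst []
      (fun _ p => (fun x => x ++ [p.2])) PySem.Dict.empty
  rw [PySem.Dict.keys_empty, PySem.Set.update_nil_left] at hkeys
  rw [PySem.Dict.items_eq_map_keys _ hnd [], hkeys, PySem.List.dedup_eq_ofList]
  apply List.map_congr_left
  intro s _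
  rw [PySem.Dict.getD_foldl_modify_append alignments PySem.Dict.empty s, PySem.Dict.getD_empty]
  simp
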